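-- pv_equiv track=rewrite | github.com/happywwy/RuleFusionForIE | utils.py | generate_candidate_entity_pair_with_win
-- ===== SOURCE A (Python) =====
-- def generate_candidate_entity_pair_with_win(entity_idx2chunk_type):
--     instance_candidate_set = set()
--     for ent1_idx in entity_idx2chunk_type.keys():
--         for ent2_idx in entity_idx2chunk_type.keys():
--             if ent1_idx[0] >= ent2_idx[0]:
--                 continue
--             instance_candidate_set.add((ent1_idx, ent2_idx))
--     return instance_candidate_set
-- ===== SOURCE B (Python) =====
-- def generate_candidate_entity_pair_with_win(entity_idx2chunk_type):
--     keys = list(entity_idx2chunk_type.keys())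
--     # successor lists memoised per distinct first coordinate
--     succ = {}
--     for k in keys:
--         if k[0] not in succ:
--             succ[k[0]] = [k2 for k2 in keys if k[0] < k2[0]]
--     out = []
--     for k1 in keys:
--         out += [(k1, k2) for k2 in succ[k1[0]]]
--     return set(out)
-- ===== Notes on version B (the rewrite author's own statement) =====
-- stated objective: alternative
-- what changed: Replaces the per-pair comparison double loop over dict keys by first building a memo table mapping each distinct first coordinate to its list of strictly-larger-first keys (one scan per distinct first value instead of one per key), then concatenating per-key cross products.
import Mathlib
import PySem

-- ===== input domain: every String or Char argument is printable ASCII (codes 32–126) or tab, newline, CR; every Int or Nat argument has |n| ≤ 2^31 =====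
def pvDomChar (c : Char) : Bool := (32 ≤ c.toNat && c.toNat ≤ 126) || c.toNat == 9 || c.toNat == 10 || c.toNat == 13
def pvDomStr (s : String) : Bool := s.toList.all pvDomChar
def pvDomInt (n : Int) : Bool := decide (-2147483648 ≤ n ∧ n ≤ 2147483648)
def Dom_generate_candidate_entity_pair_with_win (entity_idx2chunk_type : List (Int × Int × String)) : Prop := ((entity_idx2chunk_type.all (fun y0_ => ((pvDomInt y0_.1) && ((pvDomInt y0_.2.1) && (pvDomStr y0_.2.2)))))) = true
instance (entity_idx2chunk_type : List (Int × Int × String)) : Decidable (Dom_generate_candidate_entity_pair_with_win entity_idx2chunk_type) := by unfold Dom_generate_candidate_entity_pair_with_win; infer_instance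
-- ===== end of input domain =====

-- B replaces A's per-pair comparison double loop by a memo table of successor lists per
-- distinct first coordinate, then concatenates per-key cross products (alternative decomposition).

-- ===== PORT A =====
def generate_candidate_entity_pair_with_win (entity_idx2chunk_type : List (Int × Int × String)) : List ((Int × Int) × (Int × Int)) :=
  -- dict keys, in insertion order
  let ks : PySem.Set (Int × Int) := PySem.Set.ofList (entity_idx2chunk_type.map (fun e => (e.1, e.2.1)))
  ks.foldl (fun acc k1 =>
    ks.foldl (fun acc2 k2 =>
      if k1.1 ≥ k2.1 then acc2 else PySem.Set.add acc2 (k1, k2)) acc)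
    PySem.Set.empty

-- ===== PORT B =====
def generate_candidate_entity_pair_with_win_alt (entity_idx2chunk_type : List (Int × Int × String)) : List ((Int × Int) × (Int × Int)) :=
  let keys : PySem.Set (Int × Int) := PySem.Set.ofList (entity_idx2chunk_type.map (fun e => (e.1, e.2.1)))
  let succ : PySem.Dict Int (List (Int × Int)) :=
    keys.foldl (fun d k =>
      if d.contains k.1 then d
      else d.insert k.1 (keys.filter (fun k2 => decide (k.1 < k2.1)))) PySem.Dict.empty
  let out : List ((Int × Int) × (Int × Int)) :=
    keys.foldl (fun acc k1 => acc ++ (succ.getD k1.1 []).map (fun k2 => (k1, k2))) []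
  PySem.Set.ofList out

-- ===== PRECONDITION & SPEC =====
def Spec_generate_candidate_entity_pair_with_win (entity_idx2chunk_type : List (Int × Int × String)) (out : List ((Int × Int) × (Int × Int))) : Prop := out = generate_candidate_entity_pair_with_win_alt entity_idx2chunk_type
instance (entity_idx2chunk_type : List (Int × Int × String)) (out : List ((Int × Int) × (Int × Int))) : Decidable (Spec_generate_candidate_entity_pair_with_win entity_idx2chunk_type out) := by unfold Spec_generate_candidate_entity_pair_with_win; infer_instance

-- ===== CLAIM (what is proved, stated in full; the proofs are below) =====
def Claim_equal_generate_candidate_entity_pair_with_win : Prop := ∀ (entity_idx2chunk_type : List (Int × Int × String)), Dom_generate_candidate_entity_pair_with_win entity_idx2chunk_type → Spec_generate_candidate_entity_pair_with_win entity_idx2chunk_type (generate_candidate_entity_pair_with_win entity_idx2chunk_type)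

-- ===== LEMMAS AND PROOFS =====

-- the per-key successor list (keys with strictly larger first coordinate)
def pvSucc (keys : List (Int × Int)) (v : Int) : List (Int × Int) :=
  keys.filter (fun k2 => decide (v < k2.1))

def pvG (keys : List (Int × Int)) (k1 : Int × Int) : List ((Int × Int) × (Int × Int)) :=
  (pvSucc keys k1.1).map (fun k2 => (k1, k2))

-- B's memo fold answers pvSucc for every first coordinate occurring in the processed list
lemma succ_getD (keys : List (Int × Int)) :
    ∀ (ks' : List (Int × Int)) (d : PySem.Dict Int (List (Int × Int))) (v : Int),
    (∀ w, d.contains w = true → d.getD w [] = pvSucc keys w) →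
    (v ∈ ks'.map Prod.fst ∨ d.contains v = true) →
    (ks'.foldl (fun d k =>
      if d.contains k.1 then d
      else d.insert k.1 (keys.filter (fun k2 => decide (k.1 < k2.1)))) d).getD v []
      = pvSucc keys v := by
  intro ks'
  induction ks' with
  | nil =>
    intro d v hinv hmem
    simp at hmem
    exact hinv v hmem
  | cons k t ih =>
    intro d v hinv hmem
    simp only [List.foldl_cons]
    by_cases hc : d.contains k.1 = true
    · rw [if_pos hc]
      apply ih d v hinv
      rcases hmem with hm | hm
      · simp only [List.map_cons, List.mem_cons] at hm
        rcases hm with h1 | h1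
        · right; rw [h1]; exact hc
        · left; exact h1
      · right; exact hm
    · rw [if_neg hc]
      apply ih
      · intro w hw
        rw [PySem.Dict.contains_insert] at hw
        by_cases hwk : w = k.1
        · subst hwk
          rw [PySem.Dict.getD_insert_self]
          rfl
        · rw [PySem.Dict.getD_insert_of_ne _ _ _ hwk]
          apply hinv
          simp [hwk] at hw
          exact hw
      · by_cases hvk : v = k.1
        · right; subst hvk; exact PySem.Dict.contains_insert_self _ _ _
        · rcases hmem with hm | hm
          · simp only [List.map_cons, List.mem_cons] at hm
            rcases hm with h1 | h1
            · exact absurd h1 hvk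
            · left; exact h1
          · right; rw [PySem.Dict.contains_insert]; simp [hm]
  
-- A's inner loop appends the successor pairs, given all of them are fresh
lemma innerA (k1 : Int × Int) :
    ∀ (ks' : List (Int × Int)) (acc : List ((Int × Int) × (Int × Int))),
    ks'.Nodup → (∀ k2 ∈ ks', (k1, k2) ∉ acc) →
    ks'.foldl (fun acc2 k2 =>
      if k1.1 ≥ k2.1 then acc2 else PySem.Set.add acc2 (k1, k2)) acc
      = acc ++ (pvSucc ks' k1.1).map (fun k2 => (k1, k2)) := by
  intro ks'
  induction ks' with
  | nil => intro acc _ _; simp [pvSucc]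
  | cons k t ih =>
    intro acc hnd hfresh
    rcases List.nodup_cons.mp hnd with ⟨hknt, hndt⟩
    simp only [List.foldl_cons]
    by_cases hge : k1.1 ≥ k.1
    · rw [if_pos hge]
      rw [ih acc hndt (fun k2 hk2 => hfresh k2 (List.mem_cons_of_mem _ hk2))]
      have : pvSucc (k :: t) k1.1 = pvSucc t k1.1 := by
        simp only [pvSucc, List.filter_cons]
        rw [if_neg (by simp; omega)]
      rw [this]
    · rw [if_neg hge]
      have hnotmem : (k1, k) ∉ acc := hfresh k (List.mem_cons_self)
      rw [PySem.Set.add_of_not_mem hnotmem]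
      rw [ih (acc ++ [(k1, k)]) hndt ?fresh]
      · have : pvSucc (k :: t) k1.1 = k :: pvSucc t k1.1 := by
          simp only [pvSucc, List.filter_cons]
          rw [if_pos (by simp; omega)]
        rw [this]
        simp
      case fresh =>
        intro k2 hk2
        simp only [List.mem_append, List.mem_singleton]
        rintro (h | h)
        · exact hfresh k2 (List.mem_cons_of_mem _ hk2) h
        · have : k2 = k := by
            have := congrArg Prod.snd h; simpa using this
          exact hknt (this ▸ hk2)

-- A's outer loop is the flatMap of the per-key contributions
lemma outerA (keys : List (Int × Int)) (hk : keys.Nodup) :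
    ∀ (ks' : List (Int × Int)) (acc : List ((Int × Int) × (Int × Int))),
    ks'.Nodup → (∀ k1 ∈ ks', ∀ p ∈ acc, p.1 ≠ k1) →
    ks'.foldl (fun acc k1 =>
      keys.foldl (fun acc2 k2 =>
        if k1.1 ≥ k2.1 then acc2 else PySem.Set.add acc2 (k1, k2)) acc) acc
      = acc ++ ks'.flatMap (pvG keys) := by
  intro ks'
  induction ks' with
  | nil => intro acc _ _; simp
  | cons k1 t ih =>
    intro acc hnd hfresh
    rcases List.nodup_cons.mp hnd with ⟨hk1t, hndt⟩
    simp only [List.foldl_cons]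
    rw [innerA k1 keys acc hk
      (fun k2 hk2 hmem => (hfresh k1 List.mem_cons_self (k1, k2) hmem) rfl)]
    rw [ih (acc ++ (pvSucc keys k1.1).map (fun k2 => (k1, k2))) hndt ?fresh]
    · simp [pvG]
    case fresh =>
      intro k1' hk1' p hp
      rcases List.mem_append.mp hp with h | h
      · exact hfresh k1' (List.mem_cons_of_mem _ hk1') p h
      · rcases List.mem_map.mp h with ⟨k2, _, rfl⟩
        intro hcontra
        simp only at hcontra
        exact hk1t (hcontra ▸ hk1')

-- the flatMap of per-key contributions over nodup keys has no duplicates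
lemma nodup_flat (keys : List (Int × Int)) (hk : keys.Nodup) :
    ∀ (ks' : List (Int × Int)), ks'.Nodup → (ks'.flatMap (pvG keys)).Nodup := by
  intro ks'
  induction ks' with
  | nil => intro _; simp
  | cons k1 t ih =>
    intro hnd
    rcases List.nodup_cons.mp hnd with ⟨hk1t, hndt⟩
    rw [List.flatMap_cons]
    apply List.Nodup.append
    · apply List.Nodup.map
      · intro a b hab; simpa using congrArg Prod.snd hab
      · exact List.Nodup.filter _ hk
    · exact ih hndt
    · intro p hp1 hp2
      rcases List.mem_map.mp hp1 with ⟨k2, _, rfl⟩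
      rcases List.mem_flatMap.mp hp2 with ⟨k1', hk1', hpg⟩
      rcases List.mem_map.mp hpg with ⟨k2', _, heq⟩
      have : k1' = k1 := congrArg Prod.fst heq
      exact hk1t (this ▸ hk1')

-- ===== VERDICT (by name: the statement is the Claim_ definition above) =====
theorem generate_candidate_entity_pair_with_win_spec : Claim_equal_generate_candidate_entity_pair_with_win := by
  intro l _
  unfold Spec_generate_candidate_entity_pair_with_win
  unfold generate_candidate_entity_pair_with_win generate_candidate_entity_pair_with_win_alt
  simp only []
  set keys : List (Int × Int) := PySem.Set.ofList (l.map (fun e => (e.1, e.2.1))) with hkeys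
  have hk : keys.Nodup := PySem.Set.nodup_ofList _
  -- A's side
  rw [outerA keys hk keys PySem.Set.empty hk (by intro _ _ p hp; simp [PySem.Set.empty] at hp)]
  -- B's side: the out list is the same flatMap
  have hcong : ∀ (acc : List ((Int × Int) × (Int × Int))), ∀ k1 ∈ keys,
      acc ++ ((keys.foldl (fun d k =>
          if d.contains k.1 then d
          else d.insert k.1 (keys.filter (fun k2 => decide (k.1 < k2.1)))) PySem.Dict.empty).getD k1.1 []).map
          (fun k2 => (k1, k2))
      = acc ++ (pvSucc keys k1.1).map (fun k2 => (k1, k2)) := by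
    intro acc k1 hmem
    congr 1
    rw [succ_getD keys keys PySem.Dict.empty k1.1
      (by intro w hw; rw [PySem.Dict.contains_empty] at hw; exact absurd hw (by simp))
      (Or.inl (List.mem_map_of_mem hmem))]
  rw [PySem.List.foldl_congr_mem keys _
    (fun acc k1 => acc ++ (pvSucc keys k1.1).map (fun k2 => (k1, k2))) [] hcong]
  rw [PySem.List.foldl_append_eq_flatMap]
  have hflat : keys.flatMap (fun k1 => (pvSucc keys k1.1).map (fun k2 => (k1, k2)))
      = keys.flatMap (pvG keys) := rfl
  rw [hflat, List.nil_append]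
  rw [PySem.Set.ofList_eq_self_of_nodup _ (nodup_flat keys hk keys hk)]
  simp [PySem.Set.empty]
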